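-- pv_equiv track=rewrite | github.com/thc1006/molecular-krylov-pipeline | src/postprocessing/utils.py | calculate_cumulative_results
-- ===== SOURCE A (Python) =====
-- from typing import List, Dict, Union
--
-- def calculate_cumulative_results(
--     all_measurement_results: List[Dict[str, int]],
-- ) -> List[Dict[str, int]]:
--     """
--     Calculate cumulative measurement results across Krylov steps.
--
--     For step k, the cumulative results include all unique bitstrings
--     from steps 0, 1, ..., k with their total counts.
--
--     Args:
--         all_measurement_results: List of measurement dictionaries per step
--
--     Returns:
--         List of cumulative measurement dictionaries
--     """
--     cumulative = []
--     all_counts: Dict[str, int] = {}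
--
--     for step_results in all_measurement_results:
--         # Merge counts
--         for bitstring, count in step_results.items():
--             all_counts[bitstring] = all_counts.get(bitstring, 0) + count
--
--         # Store snapshot
--         cumulative.append(dict(all_counts))
--
--     return cumulative
-- ===== SOURCE B (Python) =====
-- from typing import List, Dict
--
--
-- def calculate_cumulative_results(
--     all_measurement_results: List[Dict[str, int]],
-- ) -> List[Dict[str, int]]:
--     def merged(steps: List[Dict[str, int]]) -> Dict[str, int]:
--         totals: Dict[str, int] = {}
--         for step in steps:
--             for bitstring, count in step.items():
--                 totals[bitstring] = totals.get(bitstring, 0) + count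
--         return totals
--
--     return [
--         merged(all_measurement_results[: k + 1])
--         for k in range(len(all_measurement_results))
--     ]
-- ===== Notes on version B (the rewrite author's own statement) =====
-- stated objective: alternative
-- what changed: A keeps one mutable running dict across the whole traversal and appends a snapshot copy after each step (single-pass accumulator); B has no running state at all: each cumulative dict is recomputed independently by merging the prefix of steps 0..k from scratch (staged passes over prefixes), trading O(total entries) incremental work for O(n * total entries) but eliminating shared mutable state and the copy step.
import Mathlib
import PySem

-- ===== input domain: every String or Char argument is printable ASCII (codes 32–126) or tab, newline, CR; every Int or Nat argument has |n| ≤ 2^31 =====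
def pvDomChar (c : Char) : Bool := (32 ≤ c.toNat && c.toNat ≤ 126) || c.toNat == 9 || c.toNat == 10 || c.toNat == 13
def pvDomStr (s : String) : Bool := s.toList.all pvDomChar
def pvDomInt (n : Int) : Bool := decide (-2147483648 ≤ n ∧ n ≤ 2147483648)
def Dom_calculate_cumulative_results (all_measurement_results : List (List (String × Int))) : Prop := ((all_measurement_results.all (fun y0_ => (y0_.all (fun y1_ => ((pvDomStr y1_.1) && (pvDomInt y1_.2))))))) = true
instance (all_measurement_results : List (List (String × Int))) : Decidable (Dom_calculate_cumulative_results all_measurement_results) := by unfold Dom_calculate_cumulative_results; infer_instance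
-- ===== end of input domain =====

-- B removes A's running accumulator-and-snapshot loop: each cumulative dict is
-- recomputed independently by merging the prefix of steps from scratch
-- (staged passes; no shared mutable state, at the cost of O(n·total) work).
-- ===== PORT A =====
-- for step_results in ...: for (bitstring, count): all_counts[b] = all_counts.get(b,0)+count; cumulative.append(dict(all_counts))
def calculate_cumulative_results (all_measurement_results : List (List (String × Int))) : List (List (String × Int)) :=
  (all_measurement_results.foldl
    (fun (st : List (List (String × Int)) × PySem.Dict String Int) step_results =>
      let all_counts :=
        step_results.foldl
          (fun d p => d.insert p.1 (d.getD p.1 0 + p.2)) st.2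
      (st.1 ++ [all_counts.items], all_counts))
    ([], PySem.Dict.empty)).1

-- ===== PORT B =====
-- merged(steps): totals = {}; for step: for (b,c): totals[b] = totals.get(b,0)+c
def cumMerged (steps : List (List (String × Int))) : PySem.Dict String Int :=
  steps.foldl
    (fun totals step =>
      step.foldl (fun d p => d.insert p.1 (d.getD p.1 0 + p.2)) totals)
    PySem.Dict.empty

-- [merged(ms[:k+1]) for k in range(len(ms))]; ms[:k+1] = take (k+1) since k+1 ≥ 0
def calculate_cumulative_results_alt (all_measurement_results : List (List (String × Int))) : List (List (String × Int)) :=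
  (List.range all_measurement_results.length).map
    (fun k => (cumMerged (all_measurement_results.take (k + 1))).items)

-- ===== PRECONDITION & SPEC =====
def Spec_calculate_cumulative_results (all_measurement_results : List (List (String × Int))) (out : List (List (String × Int))) : Prop := out = calculate_cumulative_results_alt all_measurement_results
instance (all_measurement_results : List (List (String × Int))) (out : List (List (String × Int))) : Decidable (Spec_calculate_cumulative_results all_measurement_results out) := by unfold Spec_calculate_cumulative_results; infer_instance

-- ===== CLAIM (what is proved, stated in full; the proofs are below) =====
def Claim_equal_calculate_cumulative_results : Prop := ∀ (all_measurement_results : List (List (String × Int))), Dom_calculate_cumulative_results all_measurement_results → Spec_calculate_cumulative_results all_measurement_results (calculate_cumulative_results all_measurement_results)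

-- ===== LEMMAS AND PROOFS =====

-- Proof-side view of A: the sequence of snapshots of the running dict.
def cumScan (prev : PySem.Dict String Int) : List (List (String × Int)) → List (List (String × Int))
  | [] => []
  | step :: rest =>
      let cur := step.foldl (fun d p => d.insert p.1 (d.getD p.1 0 + p.2)) prev
      cur.items :: cumScan cur rest

-- cumMerged's fold started from an arbitrary dict
def cumMergedFrom (d : PySem.Dict String Int) (steps : List (List (String × Int))) : PySem.Dict String Int :=
  steps.foldl
    (fun totals step =>
      step.foldl (fun d p => d.insert p.1 (d.getD p.1 0 + p.2)) totals)
    d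

-- A's fold, started from any accumulator and dict, appends exactly the scan from that dict.
theorem cum_fold_eq_scan (ms : List (List (String × Int)))
    (acc : List (List (String × Int))) (d : PySem.Dict String Int) :
    (ms.foldl
      (fun (st : List (List (String × Int)) × PySem.Dict String Int) step_results =>
        let all_counts :=
          step_results.foldl (fun d p => d.insert p.1 (d.getD p.1 0 + p.2)) st.2
        (st.1 ++ [all_counts.items], all_counts))
      (acc, d)).1 = acc ++ cumScan d ms := by
  induction ms generalizing acc d with
  | nil => simp [cumScan]
  | cons step rest ih =>
      simp only [List.foldl_cons, cumScan]
      rw [ih]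
      simp

-- The scan from d equals recomputing, for each prefix, the merged fold started from d.
theorem cum_scan_eq_prefixes (ms : List (List (String × Int))) (d : PySem.Dict String Int) :
    cumScan d ms =
      (List.range ms.length).map (fun k => (cumMergedFrom d (ms.take (k + 1))).items) := by
  induction ms generalizing d with
  | nil => simp [cumScan]
  | cons step rest ih =>
      simp only [cumScan, List.length_cons, List.range_succ_eq_map, List.map_cons,
        List.map_map]
      congr 1
      rw [ih]
      rfl

-- ===== VERDICT (by name: the statement is the Claim_ definition above) =====
theorem calculate_cumulative_results_spec : Claim_equal_calculate_cumulative_results := by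
  intro ms _
  unfold Spec_calculate_cumulative_results calculate_cumulative_results calculate_cumulative_results_alt
  rw [cum_fold_eq_scan, cum_scan_eq_prefixes]
  simp only [List.nil_append]
  rfl
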